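-- pv_equiv track=rewrite | github.com/abhishekbhave26/Coding-Portfolio | Python/twitter.py | compute_number_score
-- ===== SOURCE A (Python) =====
-- def compute_number_score(number):
--     s=str(number)
--     score=0
--     c3=0
--     n=0
--     for i in range(0,len(s)):
--         if(int(s[i])%2==1):
--             score+=1
--         if(s[i]=='5'):
--             score+=2
--         if(s[i]=='3'):
--             if(c3==0):
--                 c3+=1
--             elif(c3==1):
--                 c3+=1
--                 score+=4
--             else:
--                 score+=4
--         else:
--             c3=0
--         if(i!=0):
--             if(int(s[i-1])<int(s[i])):
--                 n+=1
--             else: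
--                 score+=n*n
--                 n=0
--
--         else:
--             score+=1
--
--     if(number%5==0):
--         score+=6
--     return score
-- ===== SOURCE B (Python) =====
-- def compute_number_score(number):
--     s = str(number)
--     score = 1 + sum(s.count(c) for c in '13579') + 2 * s.count('5')
--     if number % 5 == 0:
--         score += 6
--     three_runs = ''.join(c if c == '3' else ' ' for c in s).split()
--     score += 4 * (s.count('3') - len(three_runs))
--     breaks = [i for i, (a, b) in enumerate(zip(s, s[1:]), 1) if a >= b]
--     score += sum((b - 1 - p) ** 2 for p, b in zip([0] + breaks, breaks))
--     return score
-- ===== Notes on version B (the rewrite author's own statement) =====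
-- stated objective: alternative
-- what changed: Replaces A's single stateful digit loop (c3/n counters) by a counting algorithm: str.count tallies for the odd-digit and five bonuses, a join/split() string manipulation whose word count gives the number of maximal '3'-runs for the consecutive-threes bonus, and arithmetic on the list of non-ascent break positions for the ascending-run squares.
import Mathlib
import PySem

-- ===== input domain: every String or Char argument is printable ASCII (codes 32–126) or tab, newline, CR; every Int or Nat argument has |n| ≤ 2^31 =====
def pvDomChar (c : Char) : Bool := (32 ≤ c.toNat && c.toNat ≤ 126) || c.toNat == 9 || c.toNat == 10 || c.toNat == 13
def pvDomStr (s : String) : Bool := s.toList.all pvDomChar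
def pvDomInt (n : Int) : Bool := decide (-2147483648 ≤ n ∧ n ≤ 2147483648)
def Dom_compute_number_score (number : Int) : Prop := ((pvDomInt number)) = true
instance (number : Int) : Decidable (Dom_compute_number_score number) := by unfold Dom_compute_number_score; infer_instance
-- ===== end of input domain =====

-- B replaces A's single stateful digit loop by counting: str.count tallies for the odd-digit and
-- five bonuses, a join/split() string manipulation counting the maximal runs of '3' for the
-- consecutive-threes bonus, and arithmetic on the list of break positions for the ascending-run
-- squares; alternative algorithm, same cost.

-- int(ch) for a single char: exact on digit characters '0'..'9' (all that occur inside Pre_)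
def pvDigit (c : Char) : Int := (c.toNat : Int) - 48

-- ===== PORT A =====
def goA : List Char → Option Char → Int → Int → Int → Int
  | [], _, score, _, _ => score
  | c :: rest, prev, score, c3, n =>
    let s1 := if pvDigit c % 2 == 1 then score + 1 else score
    let s2 := if c == '5' then s1 + 2 else s1
    let s3 := if c == '3' then (if c3 == 0 then s2 else s2 + 4) else s2
    let c3' : Int := if c == '3' then (if c3 == 0 then c3 + 1 else if c3 == 1 then c3 + 1 else c3) else 0
    match prev with
    | none => goA rest (some c) (s3 + 1) c3' n
    | some p =>
        if pvDigit p < pvDigit c then goA rest (some c) s3 c3' (n + 1)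
        else goA rest (some c) (s3 + n * n) c3' 0

def compute_number_score (number : Int) : Int :=
  let s := (PySem.Int.toStr number).toList
  let base := goA s none 0 0 0
  if PySem.Int.mod number 5 == 0 then base + 6 else base

-- ===== PORT B =====
-- ''.join(...)/.split() are ported on List Char via PySem.Chars (the Str wrappers are thin over these)
def compute_number_score_alt (number : Int) : Int :=
  let s := PySem.Int.toStr number
  let cs := s.toList
  let score0 : Int := 1 + ("13579".toList.map (fun c => (PySem.Str.count s (String.ofList [c]) : Int))).sum
      + 2 * (PySem.Str.count s "5" : Int)
  let score1 := if PySem.Int.mod number 5 == 0 then score0 + 6 else score0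
  let three_runs := PySem.Chars.split₀ (PySem.Chars.join [] (cs.map (fun c => if c == '3' then ['3'] else [' '])))
  let score2 := score1 + 4 * ((PySem.Str.count s "3" : Int) - (three_runs.length : Int))
  let breaks := ((PySem.List.enumerate (cs.zip cs.tail) 1).filter (fun ib => decide (ib.2.2 ≤ ib.2.1))).map (·.1)
  score2 + (((((0 : Int) :: breaks).zip breaks).map (fun pb => (pb.2 - 1 - pb.1) ^ 2)).sum)

-- ===== PRECONDITION & SPEC =====
-- Pre_ excludes negative numbers: str(number) then starts with '-' and A raises ValueError at int('-').
def Pre_compute_number_score (number : Int) : Prop := 0 ≤ number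
instance (number : Int) : Decidable (Pre_compute_number_score number) := by unfold Pre_compute_number_score; infer_instance
def pvWitness_compute_number_score : Int := 353

def Spec_compute_number_score (number : Int) (out : Int) : Prop := out = compute_number_score_alt number
instance (number : Int) (out : Int) : Decidable (Spec_compute_number_score number out) := by unfold Spec_compute_number_score; infer_instance

-- ===== CLAIM (what is proved, stated in full; the proofs are below) =====
def Claim_equal_compute_number_score : Prop := ∀ (number : Int), Dom_compute_number_score number → Pre_compute_number_score number → Spec_compute_number_score number (compute_number_score number)

-- ===== LEMMAS AND PROOFS =====

def isDig (c : Char) : Prop := 48 ≤ c.toNat ∧ c.toNat ≤ 57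

-- per-digit contributions of A's loop, as functions of the char list
def odds : List Char → Int
  | [] => 0
  | c :: r => (if pvDigit c % 2 == 1 then 1 else 0) + odds r

def fives : List Char → Int
  | [] => 0
  | c :: r => (if c == '5' then 2 else 0) + fives r

def th : List Char → Bool → Int
  | [], _ => 0
  | c :: r, flag => (if flag && (c == '3') then 4 else 0) + th r (c == '3')

def asc : List Char → Char → Int → Int
  | [], _, _ => 0
  | c :: r, p, n => if pvDigit p < pvDigit c then asc r c (n + 1) else n * n + asc r c 0

-- number of '3'-run starts, given whether the previous char was '3'
def nrs : List Char → Bool → Nat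
  | [], _ => 0
  | c :: r, flag => (if c == '3' && !flag then 1 else 0) + nrs r (c == '3')

-- break positions of A's ascending-run loop (index of the second char of each non-ascent pair)
def brk : List Char → Char → Int → List Int
  | [], _, _ => []
  | c :: r, p, t => if pvDigit p < pvDigit c then brk r c (t + 1) else t :: brk r c (t + 1)

-- Σ (bᵢ - 1 - bᵢ₋₁)² over consecutive break positions (b₀ = the seed p)
def pairsum : Int → List Int → Int
  | _, [] => 0
  | p, b :: r => (b - 1 - p) ^ 2 + pairsum b r

-- what each char of B's join maps to
def f3 (c : Char) : Char := if c == '3' then '3' else ' '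

theorem tdc_ne_nil (b fuel n : Nat) (acc : List Char) (h : acc ≠ []) :
    Nat.toDigitsCore b fuel n acc ≠ [] := by
  induction fuel generalizing n acc with
  | zero => simpa [Nat.toDigitsCore] using h
  | succ f ih =>
    unfold Nat.toDigitsCore
    simp only []
    split
    · simp
    · exact ih _ _ (by simp)

theorem toChars_ne_nil (n : Int) : PySem.Int.toChars n ≠ [] := by
  unfold PySem.Int.toChars
  split
  · simp
  · unfold Nat.toDigits Nat.toDigitsCore
    simp only []
    split
    · simp
    · exact tdc_ne_nil _ _ _ _ (by simp)

theorem tdc_digits (fuel n : Nat) (acc : List Char) (h : ∀ c ∈ acc, isDig c) :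
    ∀ c ∈ Nat.toDigitsCore 10 fuel n acc, isDig c := by
  induction fuel generalizing n acc with
  | zero => simpa [Nat.toDigitsCore] using h
  | succ f ih =>
    have hd : isDig (Nat.digitChar (n % 10)) := by
      have h10 : n % 10 < 10 := Nat.mod_lt _ (by norm_num)
      interval_cases h' : n % 10 <;> (unfold isDig; decide)
    unfold Nat.toDigitsCore
    simp only []
    split
    · intro c hc
      rcases List.mem_cons.mp hc with rfl | hc
      · exact hd
      · exact h c hc
    · exact ih _ _ (by
        intro c hc
        rcases List.mem_cons.mp hc with rfl | hc
        · exact hd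
        · exact h c hc)

theorem toChars_digits (n : Int) (h : 0 ≤ n) : ∀ c ∈ PySem.Int.toChars n, isDig c := by
  unfold PySem.Int.toChars
  rw [if_neg (by omega)]
  unfold Nat.toDigits
  exact tdc_digits _ _ _ (by simp)

theorem char_eq_iff_toNat {c e : Char} : c = e ↔ c.toNat = e.toNat := by
  constructor
  · rintro rfl; rfl
  · intro h2; unfold Char.toNat at h2; exact Char.ext (UInt32.toNat_inj.mp h2)

-- Python's '>=' on one-char strings agrees with the digit comparison of A's loop
theorem char_le_iff (a b : Char) : (b ≤ a) ↔ ¬ (pvDigit a < pvDigit b) := by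
  rw [Char.le_def]
  unfold pvDigit Char.toNat
  rw [UInt32.le_iff_toNat_le]
  omega

-- A's interleaved loop, decomposed into the four independent tallies
theorem goA_eq (l : List Char) : ∀ (p : Char) (score c3 n : Int), (c3 = 0 ↔ ¬ p = '3') →
    goA l (some p) score c3 n = score + odds l + fives l + th l (p == '3') + asc l p n := by
  induction l with
  | nil => intro p score c3 n _; simp [goA, odds, fives, th, asc]
  | cons c r ih =>
    intro p score c3 n hinv
    have H : ((if c == '3' then (if c3 == 0 then c3 + 1 else if c3 == 1 then c3 + 1 else c3) else (0:Int)) = 0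
        ↔ ¬ c = '3') := by
      by_cases hc : c = '3' <;> simp [hc] <;> split_ifs <;> omega
    simp only [goA]
    rw [ih c _ _ _ H, ih c _ _ _ H]
    by_cases hp : p = '3' <;> by_cases hc : c = '3' <;>
      [ (have hc3 : ¬ c3 = 0 := by rw [hinv]; simp [hp]);
        (have hc3 : ¬ c3 = 0 := by rw [hinv]; simp [hp]);
        (have hc3 : c3 = 0 := hinv.mpr hp);
        (have hc3 : c3 = 0 := hinv.mpr hp) ] <;>
      simp [odds, fives, th, asc, hp, hc, hc3] <;>
      first
        | ring1
        | (split_ifs <;> first | ring1 | (exfalso; omega))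

theorem goA_top (c : Char) (r : List Char) :
    goA (c :: r) none 0 0 0 =
      1 + odds (c :: r) + fives (c :: r) + th r (c == '3') + asc r c 0 := by
  have H : ((if c == '3' then (if (0:Int) == 0 then 0 + 1 else if (0:Int) == 1 then 0 + 1 else 0) else (0:Int)) = 0
      ↔ ¬ c = '3') := by
    by_cases hc : c = '3' <;> simp [hc]
  simp only [goA]
  rw [goA_eq r c _ _ _ H]
  simp only [odds, fives, beq_iff_eq]
  split_ifs <;> first | ring1 | (exfalso; omega)

-- s.count(c) for a single character is the plain character count
theorem count_go_single (c : Char) (l : List Char) : ∀ (fuel : Nat) (acc : Nat), l.length ≤ fuel →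
    PySem.Chars.count.go [c] fuel l acc = acc + l.count c := by
  induction l with
  | nil =>
    intro fuel acc _
    cases fuel <;> simp [PySem.Chars.count.go]
  | cons h t ih =>
    intro fuel acc hf
    cases fuel with
    | zero => simp at hf
    | succ f =>
      rw [PySem.Chars.count.go]
      have ht : t.length ≤ f := by simpa using hf
      by_cases hch : c = h
      · subst hch
        simp [List.isPrefixOf, ih f (acc + 1) ht]
        omega
      · simp [List.isPrefixOf, ih f acc ht, hch, Ne.symm hch]

theorem count_single (c : Char) (l : List Char) : PySem.Chars.count l [c] = l.count c := by
  unfold PySem.Chars.count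
  simpa using count_go_single c l l.length 0 le_rfl

-- B's five str.count tallies sum to A's odd-digit contribution (digit chars only)
theorem odds_count (l : List Char) (h : ∀ c ∈ l, isDig c) :
    (['1','3','5','7','9'].map (fun c => ((l.count c : Nat) : Int))).sum = odds l := by
  induction l with
  | nil => simp [odds]
  | cons c r ih =>
    have hd := h c (by simp)
    have ihr := ih (fun x hx => h x (by simp [hx]))
    simp only [List.map_cons, List.map_nil, List.sum_cons, List.sum_nil, List.count_cons, odds,
      beq_iff_eq] at *
    have c1 : ('1':Char).toNat = 49 := by decide
    have c3 : ('3':Char).toNat = 51 := by decide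
    have c5 : ('5':Char).toNat = 53 := by decide
    have c7 : ('7':Char).toNat = 55 := by decide
    have c9 : ('9':Char).toNat = 57 := by decide
    have heq : ∀ e : Char, (c = e) ↔ (c.toNat = e.toNat) := fun e => char_eq_iff_toNat
    by_cases ho : pvDigit c % 2 = 1
    · have : c = '1' ∨ c = '3' ∨ c = '5' ∨ c = '7' ∨ c = '9' := by
        simp only [heq, c1, c3, c5, c7, c9]
        unfold pvDigit at ho
        unfold isDig at hd
        omega
      rcases this with rfl | rfl | rfl | rfl | rfl <;> simp <;> push_cast <;> omega
    · have h1 : ¬ (c = '1' ∨ c = '3' ∨ c = '5' ∨ c = '7' ∨ c = '9') := by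
        simp only [heq, c1, c3, c5, c7, c9]
        unfold pvDigit at ho
        unfold isDig at hd
        omega
      push_neg at h1
      obtain ⟨a1,a2,a3,a4,a5⟩ := h1
      simp [a1, a2, a3, a4, a5, ho]
      push_cast
      omega

theorem fives_count (l : List Char) : 2 * ((l.count '5' : Nat) : Int) = fives l := by
  induction l with
  | nil => simp [fives]
  | cons c r ih =>
    by_cases hc : c = '5' <;>
      simp [fives, List.count_cons, hc, ← ih] <;> push_cast <;> ring

-- the word count of B's split() is the number of maximal '3'-runs
theorem split_go_len (l : List Char) : ∀ (cur : List Char) (acc : List (List Char)),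
    (PySem.Chars.split₀.go (l.map f3) cur acc).length
      = acc.length + (if cur.isEmpty then 0 else 1) + nrs l (!cur.isEmpty) := by
  induction l with
  | nil =>
    intro cur acc
    cases cur <;> simp [PySem.Chars.split₀.go, nrs]
  | cons c r ih =>
    intro cur acc
    by_cases hc : c = '3'
    · simp only [List.map_cons, f3, hc, PySem.Chars.split₀.go]
      rw [if_neg (by decide)]
      cases cur <;> simp [ih, nrs] <;> omega
    · have hb : (c == '3') = false := by simp [hc]
      have : f3 c = ' ' := by simp [f3, hc]
      simp only [List.map_cons, this, PySem.Chars.split₀.go]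
      rw [if_pos (by decide)]
      cases cur <;> simp [ih, nrs, hb]

theorem th_eq_counts (l : List Char) : ∀ flag, th l flag = 4 * ((l.count '3' : Int) - (nrs l flag : Int)) := by
  induction l with
  | nil => intro flag; simp [th, nrs]
  | cons c r ih =>
    intro flag
    by_cases hc : c = '3' <;> cases flag <;>
      simp [th, nrs, List.count_cons, hc, ih] <;> push_cast <;> ring

-- asc equals the pairwise-squares sum over break positions
theorem asc_eq_pairsum (l : List Char) : ∀ (p : Char) (n t q : Int), n = t - 1 - q →
    asc l p n = pairsum q (brk l p t) := by
  induction l with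
  | nil => intro p n t q _; simp [asc, brk, pairsum]
  | cons c r ih =>
    intro p n t q hn
    by_cases hlt : pvDigit p < pvDigit c
    · simp only [asc, brk, if_pos hlt]
      exact ih c (n+1) (t+1) q (by omega)
    · simp only [asc, brk, if_neg hlt, pairsum]
      rw [ih c 0 (t+1) t (by omega)]
      subst hn
      ring

-- B's zip-of-shifted-by-one sum is pairsum
theorem zipsum_eq_pairsum (bs : List Int) : ∀ p : Int,
    (((p :: bs).zip bs).map (fun pb => (pb.2 - 1 - pb.1) ^ 2)).sum = pairsum p bs := by
  induction bs with
  | nil => intro p; simp [pairsum]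
  | cons b r ih => intro p; simp [pairsum, ih b]

-- B's enumerate/filter break-position list is brk
theorem breaks_eq_brk (l : List Char) : ∀ (p : Char) (t : Int),
    (((PySem.List.enumerate ((p :: l).zip l) t).filter (fun ib => decide (ib.2.2 ≤ ib.2.1))).map (·.1))
      = brk l p t := by
  induction l with
  | nil => intro p t; simp [brk, PySem.List.enumerate]
  | cons c r ih =>
    intro p t
    rw [List.zip_cons_cons, PySem.List.enumerate_cons]
    by_cases hlt : pvDigit p < pvDigit c
    · have : ¬ (c ≤ p) := by rw [char_le_iff]; simpa using hlt
      simp only [brk, if_pos hlt, List.filter_cons]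
      rw [if_neg (by simpa using this)]
      exact ih c (t+1)
    · have : (c ≤ p) := (char_le_iff p c).mpr hlt
      simp only [brk, if_neg hlt, List.filter_cons]
      rw [if_pos (by simpa using this)]
      simp only [List.map_cons]
      rw [ih c (t+1)]

-- B's mapped join is just the char map f3
theorem join_map_f3 (l : List Char) :
    PySem.Chars.join [] (l.map (fun c => if c == '3' then ['3'] else [' '])) = l.map f3 := by
  have hf : (fun c => if c == '3' then ['3'] else [' ']) = fun c => [f3 c] := by
    funext c; by_cases hc : c = '3' <;> simp [f3, hc]
  rw [hf, show (fun c => [f3 c]) = (fun x => [x]) ∘ f3 from rfl, ← List.map_map]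
  exact PySem.Chars.join_nil_singletons (l.map f3)

-- ===== VERDICT (by name: the statement is the Claim_ definition above) =====
theorem compute_number_score_spec : Claim_equal_compute_number_score := by
  intro number _ hpre
  unfold Spec_compute_number_score compute_number_score compute_number_score_alt
  simp only [PySem.Int.toList_toStr, PySem.Str.count_eq, PySem.Int.toList_toStr]
  obtain ⟨c, r, hl⟩ : ∃ c r, PySem.Int.toChars number = c :: r := by
    cases h : PySem.Int.toChars number with
    | nil => exact absurd h (toChars_ne_nil number)
    | cons c r => exact ⟨c, r, rfl⟩
  have hdig : ∀ x ∈ PySem.Int.toChars number, isDig x := toChars_digits number hpre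
  rw [hl] at hdig ⊢
  have h13579 : "13579".toList = ['1','3','5','7','9'] := by decide
  have hmapeq : ∀ e : Char, (String.ofList [e]).toList = [e] := fun e => by simp
  -- odd/five tallies
  have hodds : (("13579".toList).map (fun e => ((PySem.Chars.count (c :: r) (String.ofList [e]).toList : Nat) : Int))).sum
      = odds (c :: r) := by
    rw [h13579]
    simp only [List.map_cons, List.map_nil, hmapeq, count_single]
    exact odds_count (c :: r) hdig
  have hfives : 2 * ((PySem.Chars.count (c :: r) ("5".toList) : Nat) : Int) = fives (c :: r) := by
    rw [show "5".toList = ['5'] from rfl, count_single]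
    exact fives_count (c :: r)
  -- threes
  have hsplit : (PySem.Chars.split₀ (PySem.Chars.join [] ((c :: r).map (fun e => if e == '3' then ['3'] else [' '])))).length
      = nrs (c :: r) false := by
    rw [join_map_f3]
    unfold PySem.Chars.split₀
    simpa using split_go_len (c :: r) [] []
  have hth : 4 * (((PySem.Chars.count (c :: r) ("3".toList) : Nat) : Int) - ((nrs (c :: r) false : Nat) : Int))
      = th r (c == '3') := by
    rw [show "3".toList = ['3'] from rfl, count_single, th_eq_counts r (c == '3')]
    by_cases hc : c = '3' <;>
      simp [List.count_cons, nrs, hc] <;> push_cast <;> ring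
  -- ascending runs
  have hasc : (((((0 : Int) :: (((PySem.List.enumerate ((c :: r).zip (c :: r).tail) 1).filter
          (fun ib => decide (ib.2.2 ≤ ib.2.1))).map (·.1))).zip
        (((PySem.List.enumerate ((c :: r).zip (c :: r).tail) 1).filter
          (fun ib => decide (ib.2.2 ≤ ib.2.1))).map (·.1))).map
        (fun pb => (pb.2 - 1 - pb.1) ^ 2)).sum) = asc r c 0 := by
    rw [List.tail_cons, breaks_eq_brk r c 1, zipsum_eq_pairsum]
    exact (asc_eq_pairsum r c 0 1 0 (by ring)).symm
  rw [goA_top c r, hodds, hfives, hsplit, hth, hasc]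
  split_ifs <;> ring
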